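-- pv_equiv track=rewrite | github.com/SecretDeB/R2R-Make-Private-Key-Secure | main.py | xor_two_lists
-- ===== SOURCE A (Python) =====
-- def xor_two_lists(data1, data2):
--     result = []
--     for i in range(len(data1)):
--         private_key = data1[i]
--         for j in range(len(data2)):
--             private_key ^= data2[j]
--             result.append(private_key)
--     return result
-- ===== SOURCE B (Python) =====
-- def xor_two_lists(data1, data2):
--     # Build the prefix-XOR table of data2 once, then combine with each data1
--     # element; XOR associativity makes this equal to the cumulative loop.
--     pre = []
--     acc = 0
--     for y in data2:
--         acc ^= y
--         pre.append(acc)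
--     return [x ^ p for x in data1 for p in pre]
-- ===== Notes on version B (the rewrite author's own statement) =====
-- stated objective: alternative
-- what changed: B computes the prefix-XOR table of data2 once and then pairs every data1 element with it via a flat comprehension, instead of re-threading a running accumulator through data2 for every data1 element.
import Mathlib
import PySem

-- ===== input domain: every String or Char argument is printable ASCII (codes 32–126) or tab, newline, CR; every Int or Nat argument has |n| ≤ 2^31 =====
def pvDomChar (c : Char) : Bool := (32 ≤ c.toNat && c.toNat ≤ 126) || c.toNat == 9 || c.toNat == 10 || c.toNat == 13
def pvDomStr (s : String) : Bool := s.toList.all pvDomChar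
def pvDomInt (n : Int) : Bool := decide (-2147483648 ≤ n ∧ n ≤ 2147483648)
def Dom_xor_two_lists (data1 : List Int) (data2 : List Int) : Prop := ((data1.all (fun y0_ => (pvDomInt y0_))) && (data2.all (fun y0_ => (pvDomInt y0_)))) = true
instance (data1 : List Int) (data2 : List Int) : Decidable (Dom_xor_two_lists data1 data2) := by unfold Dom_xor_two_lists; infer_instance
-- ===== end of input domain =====

-- B replaces A's per-element cumulative XOR loop by a single prefix-XOR table of data2
-- combined with each data1 element via XOR associativity (alternative decomposition).


-- ===== PORT A =====
-- outer loop over data1; inner loop threads private_key over data2, appending to result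
def xor_two_lists (data1 : List Int) (data2 : List Int) : List Int :=
  data1.foldl (fun result x =>
    (data2.foldl (fun (st : List Int × Int) y =>
        let pk := PySem.Int.bxor st.2 y
        (st.1 ++ [pk], pk)) (result, x)).1) []

-- ===== PORT B =====
-- prefix-XOR scan of data2 (the Source B loop building `pre`)
def pvPrefixXor (acc : Int) : List Int → List Int
  | [] => []
  | y :: t =>
    let a := PySem.Int.bxor acc y
    a :: pvPrefixXor a t

def xor_two_lists_alt (data1 : List Int) (data2 : List Int) : List Int :=
  let pre := pvPrefixXor 0 data2
  data1.flatMap (fun x => pre.map (fun p => PySem.Int.bxor x p))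

-- ===== PRECONDITION & SPEC =====
def Spec_xor_two_lists (data1 : List Int) (data2 : List Int) (out : List Int) : Prop := out = xor_two_lists_alt data1 data2
instance (data1 : List Int) (data2 : List Int) (out : List Int) : Decidable (Spec_xor_two_lists data1 data2 out) := by unfold Spec_xor_two_lists; infer_instance

-- ===== CLAIM (what is proved, stated in full; the proofs are below) =====
def Claim_equal_xor_two_lists : Prop := ∀ (data1 : List Int) (data2 : List Int), Dom_xor_two_lists data1 data2 → Spec_xor_two_lists data1 data2 (xor_two_lists data1 data2)

-- ===== LEMMAS AND PROOFS =====
-- two's-complement encoding used to prove associativity of PySem.Int.bxor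
def pvEnc (s : Bool) (m : Nat) : Int := if s then -(m:Nat)-1 else (m:Int)

lemma pvBxor_enc (s t : Bool) (m n : Nat) :
    PySem.Int.bxor (pvEnc s m) (pvEnc t n) = pvEnc (xor s t) (m ^^^ n) := by
  cases s <;> cases t <;> simp only [pvEnc, PySem.Int.bxor, Bool.xor] <;>
    split_ifs <;> simp_all <;> omega

lemma pvEnc_surj (a : Int) :
    a = pvEnc (decide (a < 0)) (if a < 0 then (-a-1).toNat else a.toNat) := by
  by_cases h : a < 0 <;> simp [pvEnc, h] <;> omega

lemma pvBxor_assoc (a b c : Int) :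
    PySem.Int.bxor (PySem.Int.bxor a b) c = PySem.Int.bxor a (PySem.Int.bxor b c) := by
  rw [pvEnc_surj a, pvEnc_surj b, pvEnc_surj c]
  rw [pvBxor_enc, pvBxor_enc, pvBxor_enc, pvBxor_enc, Nat.xor_assoc, Bool.xor_assoc]

-- A's inner loop, started at (res, x), appends exactly the prefix scan started at x
lemma pvInner_eq (d2 : List Int) : ∀ (res : List Int) (x : Int),
    (d2.foldl (fun (st : List Int × Int) y =>
        let pk := PySem.Int.bxor st.2 y
        (st.1 ++ [pk], pk)) (res, x)).1 = res ++ pvPrefixXor x d2 := by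
  induction d2 with
  | nil => intro res x; simp [pvPrefixXor]
  | cons y t ih =>
    intro res x
    simp only [List.foldl_cons, pvPrefixXor]
    rw [ih]
    simp

-- shifting the scan's seed by x maps XOR-with-x over the scan
lemma pvPrefixXor_shift (d2 : List Int) : ∀ (x a : Int),
    pvPrefixXor (PySem.Int.bxor x a) d2 = (pvPrefixXor a d2).map (fun p => PySem.Int.bxor x p) := by
  induction d2 with
  | nil => intro x a; simp [pvPrefixXor]
  | cons y t ih =>
    intro x a
    simp only [pvPrefixXor, List.map_cons]
    rw [pvBxor_assoc, ih]

lemma pvOuter_eq (d2 : List Int) (d1 : List Int) : ∀ (acc : List Int),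
    d1.foldl (fun result x =>
      (d2.foldl (fun (st : List Int × Int) y =>
          let pk := PySem.Int.bxor st.2 y
          (st.1 ++ [pk], pk)) (result, x)).1) acc
      = acc ++ d1.flatMap (fun x => pvPrefixXor x d2) := by
  induction d1 with
  | nil => intro acc; simp
  | cons x t ih =>
    intro acc
    simp only [List.foldl_cons, List.flatMap_cons]
    rw [pvInner_eq, ih]
    simp

-- ===== VERDICT (by name: the statement is the Claim_ definition above) =====
theorem xor_two_lists_spec : Claim_equal_xor_two_lists := by
  intro data1 data2 _
  unfold Spec_xor_two_lists xor_two_lists xor_two_lists_alt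
  rw [pvOuter_eq]
  simp only [List.nil_append]
  refine List.flatMap_congr (fun x _ => ?_)
  have h := pvPrefixXor_shift data2 x 0
  rw [PySem.Int.bxor_zero] at h
  exact h
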